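-- pv_equiv track=rewrite | github.com/KashtanRusgib/meroitic-project | build_paper.py | _render_word
-- ===== SOURCE A (Python) =====
-- LATIN_TO_MEROITIC = {
--     "a": "\U00010980", "e": "\U00010981", "i": "\U00010982", "o": "\U00010983",
--     "ya": "\U00010984", "wa": "\U00010985", "ba": "\U00010986", "pa": "\U00010987",
--     "ma": "\U00010988", "na": "\U00010989", "ne": "\U0001098A", "ra": "\U0001098B",
--     "la": "\U0001098C", "ka": "\U0001098D", "ha": "\U0001098E", "sa": "\U0001098F",
--     "qa": "\U00010990", "ta": "\U00010991", "da": "\U00010992", "te": "\U00010993",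
--     "to": "\U00010994", "se": "\U00010995", "ke": "\U00010996",
-- }
--
-- def _render_word(word):
--     out, i = [], 0
--     while i < len(word):
--         if i + 1 < len(word) and word[i:i+2] in LATIN_TO_MEROITIC:
--             out.append(LATIN_TO_MEROITIC[word[i:i+2]]); i += 2
--         elif word[i] in LATIN_TO_MEROITIC:
--             out.append(LATIN_TO_MEROITIC[word[i]]); i += 1
--         else:
--             i += 1
--     return "".join(out)
-- ===== SOURCE B (Python) =====
-- LATIN_TO_MEROITIC = {
--     "a": "\U00010980", "e": "\U00010981", "i": "\U00010982", "o": "\U00010983",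
--     "ya": "\U00010984", "wa": "\U00010985", "ba": "\U00010986", "pa": "\U00010987",
--     "ma": "\U00010988", "na": "\U00010989", "ne": "\U0001098A", "ra": "\U0001098B",
--     "la": "\U0001098C", "ka": "\U0001098D", "ha": "\U0001098E", "sa": "\U0001098F",
--     "qa": "\U00010990", "ta": "\U00010991", "da": "\U00010992", "te": "\U00010993",
--     "to": "\U00010994", "se": "\U00010995", "ke": "\U00010996",
-- }
--
-- def _render_word(word):
--     # Stateless per-position transliteration: because no digraph key ends with a
--     # character that starts another key, greedy scanning state is unnecessary —
--     # each character's contribution depends only on its two neighbours.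
--     chars = list(word)
--     prevs = [None] + chars[:-1]
--     nexts = chars[1:] + [None]
--     pieces = []
--     for p, c, n in zip(prevs, chars, nexts):
--         if n is not None and c + n in LATIN_TO_MEROITIC:
--             pieces.append(LATIN_TO_MEROITIC[c + n])
--         elif c in LATIN_TO_MEROITIC and (p is None or p + c not in LATIN_TO_MEROITIC):
--             pieces.append(LATIN_TO_MEROITIC[c])
--     return "".join(pieces)
-- ===== Notes on version B (the rewrite author's own statement) =====
-- stated objective: alternative
-- what changed: A's stateful greedy scan with index bookkeeping (i advances by 1 or 2) is replaced by a stateless single pass that maps each character together with its two neighbours, exploiting the fact that no digraph key ends in a character that starts another key.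
import Mathlib
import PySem

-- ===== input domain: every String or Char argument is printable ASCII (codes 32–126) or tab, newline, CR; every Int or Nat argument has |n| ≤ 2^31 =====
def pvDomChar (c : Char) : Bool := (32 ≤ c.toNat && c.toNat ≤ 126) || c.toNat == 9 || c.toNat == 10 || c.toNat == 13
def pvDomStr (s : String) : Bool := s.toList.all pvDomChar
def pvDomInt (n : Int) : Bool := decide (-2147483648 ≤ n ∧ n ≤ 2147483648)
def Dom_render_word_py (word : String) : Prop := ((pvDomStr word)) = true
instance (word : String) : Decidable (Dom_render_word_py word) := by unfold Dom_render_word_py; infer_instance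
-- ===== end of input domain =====

-- B replaces A's stateful greedy index scan by a stateless per-character map over
-- (previous, current, next) neighbour triples (objective: alternative; same cost).

-- ===== PORT A =====
-- LATIN_TO_MEROITIC (module constant; shared verbatim by both Pythons)
def meroTable : PySem.Dict String String := PySem.Dict.ofList [("a","𐦀"), ("e","𐦁"), ("i","𐦂"), ("o","𐦃"), ("ya","𐦄"), ("wa","𐦅"), ("ba","𐦆"), ("pa","𐦇"), ("ma","𐦈"), ("na","𐦉"), ("ne","𐦊"), ("ra","𐦋"), ("la","𐦌"), ("ka","𐦍"), ("ha","𐦎"), ("sa","𐦏"), ("qa","𐦐"), ("ta","𐦑"), ("da","𐦒"), ("te","𐦓"), ("to","𐦔"), ("se","𐦕"), ("ke","𐦖")]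

-- the while-loop of A: state is (out, i); recursion on the remaining length
def renderLoop (w : List Char) (i : Nat) (out : List String) : List String :=
  if h : i < w.length then
    -- word[i:i+2] is the slice; word[i] the character (in range here)
    if i + 1 < w.length ∧
        meroTable.contains (String.ofList (PySem.List.slice w (some (i : Int)) (some ((i : Int) + 2)))) = true then
      renderLoop w (i + 2)
        (out ++ [meroTable.getD (String.ofList (PySem.List.slice w (some (i : Int)) (some ((i : Int) + 2)))) ""])
    else if meroTable.contains (String.ofList [w[i]]) = true then
      renderLoop w (i + 1) (out ++ [meroTable.getD (String.ofList [w[i]]) ""])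
    else
      renderLoop w (i + 1) out
  else out
termination_by w.length - i

def render_word_py (word : String) : String :=
  PySem.Str.join "" (renderLoop word.toList 0 [])

-- ===== PORT B =====
-- the elif-branch of B's loop body: emit c's own character unless the previous
-- character p combines with c into a digraph key
def stepB1 (p : Option Char) (c : Char) : List String :=
  if meroTable.contains (String.ofList [c]) = true then
    match p with
    | none => [meroTable.getD (String.ofList [c]) ""]
    | some pc =>
        if meroTable.contains (String.ofList [pc, c]) = true then []
        else [meroTable.getD (String.ofList [c]) ""]
  else []

-- B's loop body on one (p, c, n) neighbour triple
def stepB (p : Option Char) (c : Char) (n : Option Char) : List String :=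
  match n with
  | some nc =>
      if meroTable.contains (String.ofList [c, nc]) = true then
        [meroTable.getD (String.ofList [c, nc]) ""]
      else stepB1 p c
  | none => stepB1 p c

def render_word_py_alt (word : String) : String :=
  let chars := word.toList
  let prevs : List (Option Char) := none :: chars.dropLast.map some      -- [None] + chars[:-1]
  let nexts : List (Option Char) := (chars.drop 1).map some ++ [none]    -- chars[1:] + [None]
  let pieces := (prevs.zip (chars.zip nexts)).foldl
    (fun acc t => acc ++ stepB t.1 t.2.1 t.2.2) []
  PySem.Str.join "" pieces

-- ===== PRECONDITION & SPEC =====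
def Spec_render_word_py (word : String) (out : String) : Prop := out = render_word_py_alt word
instance (word : String) (out : String) : Decidable (Spec_render_word_py word out) := by unfold Spec_render_word_py; infer_instance

-- ===== CLAIM (what is proved, stated in full; the proofs are below) =====
def Claim_equal_render_word_py : Prop := ∀ (word : String), Dom_render_word_py word → Spec_render_word_py word (render_word_py word)

-- ===== LEMMAS AND PROOFS =====

-- B's zip builds exactly the list of (previous, current, next) triples
def triples (p : Option Char) : List Char → List (Option Char × Char × Option Char)
  | [] => []
  | c :: rest => (p, c, rest.head?) :: triples (some c) rest

-- digraph keys of the table, as character pairs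
def twoKeyPairs : List (Char × Char) := [('y','a'), ('w','a'), ('b','a'), ('p','a'), ('m','a'), ('n','a'), ('n','e'), ('r','a'), ('l','a'), ('k','a'), ('h','a'), ('s','a'), ('q','a'), ('t','a'), ('d','a'), ('t','e'), ('t','o'), ('s','e'), ('k','e')]

lemma mero_keys_eq : meroTable.keys = ["a", "e", "i", "o", "ya", "wa", "ba", "pa", "ma", "na", "ne", "ra", "la", "ka", "ha", "sa", "qa", "ta", "da", "te", "to", "se", "ke"] := by rfl

lemma two_key_pairs (x y : Char)
    (h : meroTable.contains (String.ofList [x, y]) = true) : (x, y) ∈ twoKeyPairs := by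
  have hk : (String.ofList [x, y]) ∈ meroTable.keys :=
    (PySem.Dict.contains_iff_mem_keys meroTable (String.ofList [x, y])).mp h
  rw [mero_keys_eq] at hk
  simp only [List.mem_cons, List.not_mem_nil, or_false] at hk
  rcases hk with h1|h1|h1|h1|h1|h1|h1|h1|h1|h1|h1|h1|h1|h1|h1|h1|h1|h1|h1|h1|h1|h1|h1 <;>
    have h2 := congrArg String.toList h1 <;> simp at h2 <;>
    (obtain ⟨rfl, rfl⟩ := h2; decide)

-- the second character of a digraph key never starts a key
lemma key_after_key (x y z : Char)
    (h : meroTable.contains (String.ofList [x, y]) = true) :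
    meroTable.contains (String.ofList [y, z]) = false := by
  have hsnd : y = 'a' ∨ y = 'e' ∨ y = 'o' := by
    have hm := List.mem_map_of_mem (f := Prod.snd) (two_key_pairs x y h)
    simp [twoKeyPairs] at hm
    tauto
  cases hc : meroTable.contains (String.ofList [y, z]) with
  | false => rfl
  | true =>
      exfalso
      rcases hsnd with rfl | rfl | rfl <;>
        · have hp := two_key_pairs _ z hc
          simp [twoKeyPairs] at hp

lemma drop_take_two (w : List Char) (i : Nat) (h : i + 1 < w.length) :
    (w.drop i).take 2 = [w[i], w[i + 1]] := by
  rw [List.drop_eq_getElem_cons (by omega), List.drop_eq_getElem_cons h]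
  rfl

-- word[i:i+2] as a two-character list (i+1 < len)
lemma slice_two (w : List Char) (i : Nat) (h : i + 1 < w.length) :
    PySem.List.slice w (some (i : Int)) (some ((i : Int) + 2)) = [w[i], w[i + 1]] := by
  have := PySem.List.slice_natCast_add w i 2
  rw [show ((i : Int) + 2) = ((i : Int) + ((2 : Nat) : Int)) by norm_cast, this,
    drop_take_two w i h]

-- the previous character seen from position i
def prevOpt (w : List Char) (i : Nat) : Option Char :=
  if i = 0 then none else w[i - 1]?

-- invariant of A's scan: position i is not the second half of a digraph match
def Good (w : List Char) (i : Nat) : Prop :=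
  i = 0 ∨ w.length ≤ i ∨ meroTable.contains (String.ofList ((w.drop (i - 1)).take 2)) = false

-- a position that completes a digraph match contributes nothing in B
lemma stepB_suppressed (x y : Char) (n : Option Char)
    (h : meroTable.contains (String.ofList [x, y]) = true) : stepB (some x) y n = [] := by
  have h1 : stepB1 (some x) y = [] := by
    unfold stepB1
    by_cases hy : meroTable.contains (String.ofList [y]) = true
    · simp [hy, h]
    · simp [hy]
  cases n with
  | none => simpa [stepB] using h1
  | some nc => simp [stepB, key_after_key x y nc h, h1]

-- B's neighbour zip builds exactly the triple list
lemma zip_eq_triples : ∀ (s : List Char) (p : Option Char),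
    (p :: s.dropLast.map some).zip (s.zip ((s.drop 1).map some ++ [none])) = triples p s := by
  intro s
  induction s with
  | nil => intro p; rfl
  | cons c rest ih =>
      intro p
      cases rest with
      | nil => rfl
      | cons d t =>
          have h := ih (some c)
          simp only [List.drop_succ_cons, List.drop_zero] at h
          rw [show triples p (c :: d :: t)
                = (p, c, some d) :: triples (some c) (d :: t) from rfl, ← h]
          rfl

lemma renderLoopDone (w : List Char) (i : Nat) (out : List String) (hi : ¬ i < w.length) :
    renderLoop w i out = out := by
  rw [renderLoop]; simp [hi]

lemma loop_eq (w : List Char) : ∀ (n i : Nat), w.length - i ≤ n → ∀ (out : List String),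
    i ≤ w.length → Good w i →
    renderLoop w i out =
      out ++ (triples (prevOpt w i) (w.drop i)).flatMap (fun t => stepB t.1 t.2.1 t.2.2) := by
  intro n
  induction n with
  | zero =>
      intro i hni out hle hg
      have hi : ¬ i < w.length := by omega
      rw [renderLoopDone w i out hi, List.drop_eq_nil_of_le (by omega)]
      simp [triples]
  | succ n ih =>
      intro i hni out hle hg
      by_cases hi : i < w.length
      · have hdrop : w.drop i = w[i] :: w.drop (i + 1) := List.drop_eq_getElem_cons hi
        rw [renderLoop, dif_pos hi]
        by_cases h2 : i + 1 < w.length ∧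
            meroTable.contains (String.ofList (PySem.List.slice w (some (i : Int)) (some ((i : Int) + 2)))) = true
        · obtain ⟨hlt, hcon⟩ := h2
          have hsl := slice_two w i hlt
          rw [if_pos ⟨hlt, hcon⟩, hsl]
          rw [hsl] at hcon
          have hgood2 : Good w (i + 2) := by
            by_cases h3 : i + 2 < w.length
            · right; right
              rw [show i + 2 - 1 = i + 1 from rfl, drop_take_two w (i + 1) (by omega)]
              exact key_after_key w[i] w[i + 1] w[i + 2] hcon
            · right; left; omega
          rw [ih (i + 2) (by omega) _ (by omega) hgood2]
          have hdrop1 : w.drop (i + 1) = w[i + 1] :: w.drop (i + 2) := List.drop_eq_getElem_cons hlt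
          rw [hdrop, hdrop1]
          rw [show triples (prevOpt w i) (w[i] :: w[i + 1] :: w.drop (i + 2))
                = (prevOpt w i, w[i], some w[i + 1]) ::
                  (some w[i], w[i + 1], (w.drop (i + 2)).head?) ::
                  triples (some w[i + 1]) (w.drop (i + 2)) from rfl]
          rw [List.flatMap_cons, List.flatMap_cons]
          have e1 : stepB (prevOpt w i) w[i] (some w[i + 1])
              = [meroTable.getD (String.ofList [w[i], w[i + 1]]) ""] := by
            simp [stepB, hcon]
          have e2 : stepB (some w[i]) w[i + 1] ((w.drop (i + 2)).head?) = [] :=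
            stepB_suppressed _ _ _ hcon
          rw [e1, e2]
          have hprev : prevOpt w (i + 2) = some w[i + 1] := by
            simp only [prevOpt, show i + 2 - 1 = i + 1 from rfl, if_neg (by omega : ¬ i + 2 = 0)]
            exact List.getElem?_eq_getElem hlt
          rw [hprev]
          simp [List.append_assoc]
        · rw [if_neg h2]
          have hfalse2 : ∀ _ : i + 1 < w.length,
              meroTable.contains (String.ofList [w[i], w[i + 1]]) = false := by
            intro hlt
            cases hc : meroTable.contains (String.ofList [w[i], w[i + 1]]) with
            | false => rfl
            | true => exact absurd ⟨hlt, by rw [slice_two w i hlt]; exact hc⟩ h2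
          have hgood1 : Good w (i + 1) := by
            by_cases h3 : i + 1 < w.length
            · right; right
              rw [show i + 1 - 1 = i from rfl, drop_take_two w i h3]
              exact hfalse2 h3
            · right; left; omega
          have hhead : (w.drop (i + 1)).head? = w[i + 1]? := List.head?_drop
          have houter : stepB (prevOpt w i) w[i] ((w.drop (i + 1)).head?)
              = stepB1 (prevOpt w i) w[i] := by
            by_cases h3 : i + 1 < w.length
            · rw [hhead, List.getElem?_eq_getElem h3]
              simp [stepB, hfalse2 h3]
            · rw [hhead, List.getElem?_eq_none (by omega)]
              rfl
          have hstep1val : stepB1 (prevOpt w i) w[i]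
              = (if meroTable.contains (String.ofList [w[i]]) = true
                  then [meroTable.getD (String.ofList [w[i]]) ""] else []) := by
            unfold stepB1
            by_cases hc1 : meroTable.contains (String.ofList [w[i]]) = true
            · rw [if_pos hc1, if_pos hc1]
              cases hpv : prevOpt w i with
              | none => rfl
              | some pc =>
                  have hi0 : ¬ i = 0 := by
                    intro h0
                    rw [h0] at hpv
                    simp [prevOpt] at hpv
                  have hpc : pc = w[i - 1]'(by omega) := by
                    rw [prevOpt, if_neg hi0] at hpv
                    obtain ⟨_, hpc⟩ := List.getElem?_eq_some_iff.mp hpv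
                    exact hpc.symm
                  rcases hg with h0 | hlen | hcf
                  · exact absurd h0 hi0
                  · omega
                  · rw [drop_take_two w (i - 1) (by omega)] at hcf
                    simp only [show i - 1 + 1 = i from by omega] at hcf
                    rw [hpc]
                    simp [hcf]
            · rw [if_neg hc1, if_neg hc1]
          rw [hdrop]
          rw [show triples (prevOpt w i) (w[i] :: w.drop (i + 1))
                = (prevOpt w i, w[i], (w.drop (i + 1)).head?) ::
                  triples (some w[i]) (w.drop (i + 1)) from rfl]
          rw [List.flatMap_cons, houter, hstep1val]
          have hprev1 : prevOpt w (i + 1) = some w[i] := by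
            simp only [prevOpt, show i + 1 - 1 = i from rfl, if_neg (by omega : ¬ i + 1 = 0)]
            exact List.getElem?_eq_getElem hi
          by_cases hc1 : meroTable.contains (String.ofList [w[i]]) = true
          · rw [if_pos hc1, if_pos hc1, ih (i + 1) (by omega) _ (by omega) hgood1, hprev1]
            simp [List.append_assoc]
          · rw [if_neg hc1, if_neg hc1, ih (i + 1) (by omega) _ (by omega) hgood1, hprev1]
            simp
      · rw [renderLoopDone w i out hi, List.drop_eq_nil_of_le (by omega)]
        simp [triples]

theorem render_eq (word : String) : render_word_py word = render_word_py_alt word := by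
  unfold render_word_py render_word_py_alt
  dsimp only
  rw [zip_eq_triples word.toList none, PySem.List.foldl_append_eq_flatMap,
    loop_eq word.toList word.toList.length 0 (by omega) [] (by omega) (Or.inl rfl)]
  simp [prevOpt]

-- ===== VERDICT (by name: the statement is the Claim_ definition above) =====
theorem render_word_py_spec : Claim_equal_render_word_py := by
  intro word _
  unfold Spec_render_word_py
  exact render_eq word
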